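-- pv_equiv track=rewrite | github.com/IndraPur1/Algorithm-Analysis-and-Strategy | UrutkanDNA.py | find_anomaly_dna
-- ===== SOURCE A (Python) =====
-- def find_anomaly_dna(s):
--     n = len(s)
--     a_count = 0
--     t_count = 0
--     c_count = 0
--     g_count = 0
--
--     a_diff = 0
--     c_diff = 0
--
--     min_a_diff = 0
--     min_c_diff = 0
--
--     for i in range(n):
--         if s[i] == 'A':
--             a_count += 1
--         elif s[i] == 'T':
--             t_count += 1
--         elif s[i] == 'C':
--             c_count += 1
--         elif s[i] == 'G':
--             g_count += 1
--
--         a_diff = a_count - t_count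
--         c_diff = c_count - g_count
--
--         if a_diff < min_a_diff or c_diff < min_c_diff:
--             return i + 1
--
--         min_a_diff = min(min_a_diff, a_diff)
--         min_c_diff = min(min_c_diff, c_diff)
--
--     return -1
-- ===== SOURCE B (Python) =====
-- def find_anomaly_dna(s):
--     # phase 1: map each char to a delta and materialize the cumulative prefix balances
--     deltas = [(1, 0) if ch == 'A' else
--               (-1, 0) if ch == 'T' else
--               (0, 1) if ch == 'C' else
--               (0, -1) if ch == 'G' else
--               (0, 0) for ch in s]
--     balances = []
--     x = y = 0
--     for dx, dy in deltas:
--         x += dx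
--         y += dy
--         balances.append((x, y))
--     # phase 2: scan the table for the first negative component
--     for i, (x, y) in enumerate(balances):
--         if x < 0 or y < 0:
--             return i + 1
--     return -1
-- ===== Notes on version B (the rewrite author's own statement) =====
-- stated objective: alternative
-- what changed: Replaces A's fused counter loop with dead min-tracking by a two-phase decomposition: map chars to delta pairs and materialize the cumulative prefix-balance table, then scan it for the first negative component.
import Mathlib
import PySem

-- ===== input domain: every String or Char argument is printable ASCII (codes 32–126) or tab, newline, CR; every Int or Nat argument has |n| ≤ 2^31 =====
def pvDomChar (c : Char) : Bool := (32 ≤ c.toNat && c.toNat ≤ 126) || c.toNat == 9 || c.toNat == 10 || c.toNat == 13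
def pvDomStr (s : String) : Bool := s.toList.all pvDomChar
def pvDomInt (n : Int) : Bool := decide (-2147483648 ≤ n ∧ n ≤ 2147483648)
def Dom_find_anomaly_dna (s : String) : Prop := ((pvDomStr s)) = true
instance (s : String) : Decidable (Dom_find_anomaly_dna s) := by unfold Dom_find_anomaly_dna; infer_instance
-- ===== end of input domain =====

-- B replaces A's fused early-exit counter loop (with its min-tracking) by a two-phase
-- build-prefix-balance-table-then-scan decomposition; same asymptotic cost (objective: alternative).

-- ===== PORT A =====
-- one loop iteration's count update (A's if/elif chain)
def pvStepA (ch : Char) (a t c g : Int) : Int × Int × Int × Int :=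
  if ch = 'A' then (a + 1, t, c, g)
  else if ch = 'T' then (a, t + 1, c, g)
  else if ch = 'C' then (a, t, c + 1, g)
  else if ch = 'G' then (a, t, c, g + 1)
  else (a, t, c, g)

-- A's loop: four counts, diffs compared against tracked minimums, early return i+1
def pvGoA : List Char → Int → Int → Int → Int → Int → Int → Int → Int
  | [], _, _, _, _, _, _, _ => -1
  | ch :: rest, i, a, t, c, g, mA, mC =>
    let s := pvStepA ch a t c g
    let aDiff := s.1 - s.2.1
    let cDiff := s.2.2.1 - s.2.2.2
    if aDiff < mA ∨ cDiff < mC then i + 1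
    else pvGoA rest (i + 1) s.1 s.2.1 s.2.2.1 s.2.2.2 (min mA aDiff) (min mC cDiff)

def find_anomaly_dna (s : String) : Int :=
  pvGoA s.toList 0 0 0 0 0 0 0

-- ===== PORT B =====
def pvDelta (ch : Char) : Int × Int :=
  if ch = 'A' then (1, 0)
  else if ch = 'T' then (-1, 0)
  else if ch = 'C' then (0, 1)
  else if ch = 'G' then (0, -1)
  else (0, 0)

-- phase 1: cumulative prefix balances of the delta list
def pvBalances : List (Int × Int) → Int → Int → List (Int × Int)
  | [], _, _ => []
  | d :: rest, x, y => (x + d.1, y + d.2) :: pvBalances rest (x + d.1) (y + d.2)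

-- phase 2: first index whose balance has a negative component
def pvScan : List (Int × Int) → Int → Int
  | [], _ => -1
  | p :: rest, i => if p.1 < 0 ∨ p.2 < 0 then i + 1 else pvScan rest (i + 1)

def find_anomaly_dna_alt (s : String) : Int :=
  pvScan (pvBalances (s.toList.map pvDelta) 0 0) 0

-- ===== PRECONDITION & SPEC =====
def Spec_find_anomaly_dna (s : String) (out : Int) : Prop := out = find_anomaly_dna_alt s
instance (s : String) (out : Int) : Decidable (Spec_find_anomaly_dna s out) := by unfold Spec_find_anomaly_dna; infer_instance

-- ===== CLAIM (what is proved, stated in full; the proofs are below) =====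
def Claim_equal_find_anomaly_dna : Prop := ∀ (s : String), Dom_find_anomaly_dna s → Spec_find_anomaly_dna s (find_anomaly_dna s)

-- ===== LEMMAS AND PROOFS =====

-- one iteration: A's return/continue-step equals B's scan-step on the cons'd balance,
-- given the inductive hypothesis for the rest of the string
lemma step_case (rest : List Char) (i x y dx dy a' t' c' g' : Int)
    (ih : ∀ (i a t c g x y : Int), x = a - t → y = c - g → 0 ≤ x → 0 ≤ y →
        pvGoA rest i a t c g 0 0 = pvScan (pvBalances (rest.map pvDelta) x y) i)
    (ha : a' - t' = x + dx) (hc : c' - g' = y + dy) (_ : 0 ≤ x) (_ : 0 ≤ y) :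
    (if a' - t' < 0 ∨ c' - g' < 0 then i + 1
     else pvGoA rest (i + 1) a' t' c' g' (min 0 (a' - t')) (min 0 (c' - g')))
    = (if x + dx < 0 ∨ y + dy < 0 then i + 1
       else pvScan (pvBalances (rest.map pvDelta) (x + dx) (y + dy)) (i + 1)) := by
  rw [ha, hc]
  split_ifs with h
  · rfl
  · push_neg at h
    rw [show min (0:Int) (x + dx) = 0 by omega, show min (0:Int) (y + dy) = 0 by omega]
    exact ih _ a' t' c' g' _ _ ha.symm hc.symm (by omega) (by omega)

-- Loop invariant: while both running diffs have stayed nonnegative the tracked minimums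
-- are 0, and A's fused loop computes exactly B's scan of the remaining balance table.
lemma pvGoA_eq_scan : ∀ (cs : List Char) (i a t c g x y : Int),
    x = a - t → y = c - g → 0 ≤ x → 0 ≤ y →
    pvGoA cs i a t c g 0 0 = pvScan (pvBalances (cs.map pvDelta) x y) i := by
  intro cs
  induction cs with
  | nil => intro i a t c g x y _ _ _ _; simp [pvGoA, pvBalances, pvScan]
  | cons ch rest ih =>
    intro i a t c g x y hx hy hx0 hy0
    subst hx; subst hy
    by_cases h1 : ch = 'A' <;> by_cases h2 : ch = 'T' <;>
      by_cases h3 : ch = 'C' <;> by_cases h4 : ch = 'G' <;>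
      (try subst h1) <;> (try subst h2) <;> (try subst h3) <;> (try subst h4) <;>
      simp only [pvGoA, pvStepA, pvDelta, List.map_cons, pvBalances, pvScan, reduceIte,
        Char.reduceEq, if_neg, not_false_iff, *]
    all_goals (apply step_case rest i (a - t) (c - g) _ _ _ _ _ _ ih ?_ ?_ hx0 hy0) <;> omega

-- ===== VERDICT (by name: the statement is the Claim_ definition above) =====
theorem find_anomaly_dna_spec : Claim_equal_find_anomaly_dna := by
  intro s _
  unfold Spec_find_anomaly_dna find_anomaly_dna find_anomaly_dna_alt
  exact pvGoA_eq_scan s.toList 0 0 0 0 0 0 0 (by ring) (by ring) le_rfl le_rfl
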